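-- pv_equiv track=rewrite | github.com/pedro-rovieri/chatbot_ai_regeneration_credit | scripts_exemplos/main_app.py | _escape_md_preserving_bullets
-- ===== SOURCE A (Python) =====
-- def _escape_markdown(text: str) -> str:
--     if not isinstance(text, str):
--         return text
--     text = text.replace("\\", "\\\\")
--     for ch in ["$", "*", "_", "[", "]", "(", ")", "#", "`", ">", "+", "!", "|"]:
--         text = text.replace(ch, f"\\{ch}")
--     return text
--
-- def _escape_md_preserving_bullets(block: str) -> str:
--     if not isinstance(block, str):
--         return block
--     out_lines = []
--     for line in block.splitlines():
--         stripped = line.lstrip()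
--         prefix_ws = line[: len(line) - len(stripped)]
--         if stripped.startswith("- "):
--             content = stripped[2:]
--             out_lines.append(f"{prefix_ws}- {_escape_markdown(content)}")
--         else:
--             out_lines.append(f"{prefix_ws}{_escape_markdown(stripped)}")
--     return "\n".join(out_lines)
-- ===== SOURCE B (Python) =====
-- _SPECIALS = set("\\$*_[]()#`>|+!")
--
--
-- def _escape_markdown(text):
--     if not isinstance(text, str):
--         return text
--     return "".join("\\" + c if c in _SPECIALS else c for c in text)
--
--
-- def _escape_line(line):
--     stripped = line.lstrip()
--     prefix_ws = line[: len(line) - len(stripped)]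
--     if stripped.startswith("- "):
--         return prefix_ws + "- " + _escape_markdown(stripped[2:])
--     return prefix_ws + _escape_markdown(stripped)
--
--
-- def _escape_md_preserving_bullets(block):
--     if not isinstance(block, str):
--         return block
--     return "\n".join(_escape_line(line) for line in block.splitlines())
-- ===== Notes on version B (the rewrite author's own statement) =====
-- stated objective: simpler
-- what changed: Replaced the 14 sequential full-string replace passes of _escape_markdown by a single left-to-right pass that prepends a backslash to any character in a precomputed special-character set, and the outer accumulate-append loop by a join over a per-line helper.
import Mathlib
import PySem

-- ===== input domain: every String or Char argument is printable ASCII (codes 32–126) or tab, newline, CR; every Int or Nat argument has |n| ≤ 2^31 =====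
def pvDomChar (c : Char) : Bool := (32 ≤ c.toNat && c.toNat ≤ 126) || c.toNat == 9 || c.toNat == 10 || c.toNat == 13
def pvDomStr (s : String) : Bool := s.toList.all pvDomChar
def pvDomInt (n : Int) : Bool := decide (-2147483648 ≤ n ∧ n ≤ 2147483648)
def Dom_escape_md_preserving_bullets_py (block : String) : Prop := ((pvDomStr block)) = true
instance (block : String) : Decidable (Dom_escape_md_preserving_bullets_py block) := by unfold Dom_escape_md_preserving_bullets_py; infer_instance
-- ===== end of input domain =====

-- B: one left-to-right escaping pass with a precomputed special-character set instead of
-- A's 14 sequential str.replace passes per line (objective: simpler).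

-- ===== PORT A =====
def pvEscapeMarkdownA (text : String) : String :=
  let text1 := PySem.Str.replace text "\\" "\\\\"
  (["$", "*", "_", "[", "]", "(", ")", "#", "`", ">", "+", "!", "|"] : List String).foldl
    (fun t ch => PySem.Str.replace t ch ("\\" ++ ch)) text1

def escape_md_preserving_bullets_py (block : String) : String :=
  let out_lines := (PySem.Str.splitlines block).foldl
    (fun acc line =>
      let stripped := PySem.Str.lstrip line
      let prefix_ws := PySem.Str.slice line none (some (PySem.Str.len line - PySem.Str.len stripped))
      if PySem.Str.startswith stripped "- " then
        acc ++ [prefix_ws ++ "- " ++ pvEscapeMarkdownA (PySem.Str.slice stripped (some 2) none)]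
      else
        acc ++ [prefix_ws ++ pvEscapeMarkdownA stripped]) ([] : List String)
  PySem.Str.join "\n" out_lines

-- ===== PORT B =====
def pvSpecials : PySem.Set Char := PySem.Set.ofList "\\$*_[]()#`>|+!".toList

def pvEscapeMarkdownB (text : String) : String :=
  String.ofList (text.toList.flatMap (fun c => if pvSpecials.contains c then ['\\', c] else [c]))

def pvEscapeLine (line : String) : String :=
  let stripped := PySem.Str.lstrip line
  let prefix_ws := PySem.Str.slice line none (some (PySem.Str.len line - PySem.Str.len stripped))
  if PySem.Str.startswith stripped "- " then
    prefix_ws ++ "- " ++ pvEscapeMarkdownB (PySem.Str.slice stripped (some 2) none)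
  else
    prefix_ws ++ pvEscapeMarkdownB stripped

def escape_md_preserving_bullets_py_alt (block : String) : String :=
  PySem.Str.join "\n" ((PySem.Str.splitlines block).map pvEscapeLine)

-- ===== PRECONDITION & SPEC =====
def Spec_escape_md_preserving_bullets_py (block : String) (out : String) : Prop := out = escape_md_preserving_bullets_py_alt block
instance (block : String) (out : String) : Decidable (Spec_escape_md_preserving_bullets_py block out) := by unfold Spec_escape_md_preserving_bullets_py; infer_instance

-- ===== CLAIM (what is proved, stated in full; the proofs are below) =====
def Claim_equal_escape_md_preserving_bullets_py : Prop := ∀ (block : String), Dom_escape_md_preserving_bullets_py block → Spec_escape_md_preserving_bullets_py block (escape_md_preserving_bullets_py block)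

-- ===== LEMMAS AND PROOFS =====

lemma pvGoSingle (c : Char) (new : List Char) :
    ∀ (fuel : Nat) (s acc : List Char), s.length ≤ fuel →
      PySem.Chars.replace.go [c] new fuel s acc
        = acc.reverse ++ s.flatMap (fun x => if x = c then new else [x]) := by
  intro fuel
  induction fuel with
  | zero =>
    intro s acc h
    have hs : s = [] := List.eq_nil_of_length_eq_zero (Nat.le_zero.mp h)
    subst hs
    rw [PySem.Chars.replace.go.eq_def]
    simp
  | succ n ih =>
    intro s acc h
    cases s with
    | nil =>
      rw [PySem.Chars.replace.go.eq_def]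
      simp
    | cons x t =>
      have hpref : [c].isPrefixOf (x :: t) = (c == x) := by simp [List.isPrefixOf]
      rw [PySem.Chars.replace.go.eq_def]
      simp only [hpref]
      by_cases hx : c = x
      · subst hx
        simp only [beq_self_eq_true, if_true, List.length_cons, List.length_nil, Nat.zero_add,
          List.drop_succ_cons, List.drop_zero]
        rw [ih t (new.reverse ++ acc) (Nat.le_of_succ_le_succ h)]
        simp [List.flatMap_cons]
      · have hbx : (c == x) = false := beq_eq_false_iff_ne.mpr hx
        simp only [hbx, Bool.false_eq_true, if_false]
        rw [ih t (x :: acc) (Nat.le_of_succ_le_succ h)]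
        have hxc : ¬ (x = c) := fun h' => hx h'.symm
        simp [List.flatMap_cons, hxc]

lemma pvReplaceSingle (s : List Char) (c : Char) (new : List Char) :
    PySem.Chars.replace s [c] new = s.flatMap (fun x => if x = c then new else [x]) := by
  rw [PySem.Chars.replace]
  simp only [List.isEmpty_cons, Bool.false_eq_true, if_false]
  exact (pvGoSingle c new s.length s [] (Nat.le_refl _)).trans (by simp)

lemma pvEscAB (s : String) : pvEscapeMarkdownA s = pvEscapeMarkdownB s := by
  apply String.toList_inj.mp
  unfold pvEscapeMarkdownA pvEscapeMarkdownB
  simp only [List.foldl_cons, List.foldl_nil, PySem.Str.toList_replace]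
  simp only [String.toList_append]
  norm_num
  simp only [show ("\\" : String).toList = ['\\'] from by simp,
    show ("\\\\" : String).toList = ['\\','\\'] from by simp,
    show ("$" : String).toList = ['$'] from by simp,
    show ("*" : String).toList = ['*'] from by simp,
    show ("_" : String).toList = ['_'] from by simp,
    show ("[" : String).toList = ['['] from by simp,
    show ("]" : String).toList = [']'] from by simp,
    show ("(" : String).toList = ['('] from by simp,
    show (")" : String).toList = [')'] from by simp,
    show ("#" : String).toList = ['#'] from by simp,
    show ("`" : String).toList = ['`'] from by simp,
    show (">" : String).toList = ['>'] from by simp,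
    show ("+" : String).toList = ['+'] from by simp,
    show ("!" : String).toList = ['!'] from by simp,
    show ("|" : String).toList = ['|'] from by simp, List.cons_append, List.nil_append]
  simp only [pvReplaceSingle, List.flatMap_assoc]
  congr 1
  funext c
  by_cases h0 : c = '\\'
  · subst h0; decide
  by_cases h1 : c = '$'
  · subst h1; decide
  by_cases h2 : c = '*'
  · subst h2; decide
  by_cases h3 : c = '_'
  · subst h3; decide
  by_cases h4 : c = '['
  · subst h4; decide
  by_cases h5 : c = ']'
  · subst h5; decide
  by_cases h6 : c = '('
  · subst h6; decide
  by_cases h7 : c = ')'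
  · subst h7; decide
  by_cases h8 : c = '#'
  · subst h8; decide
  by_cases h9 : c = '`'
  · subst h9; decide
  by_cases h10 : c = '>'
  · subst h10; decide
  by_cases h11 : c = '+'
  · subst h11; decide
  by_cases h12 : c = '!'
  · subst h12; decide
  by_cases h13 : c = '|'
  · subst h13; decide
  simp [pvSpecials, PySem.Set.mem_ofList, h0, h1, h2, h3, h4, h5, h6, h7, h8, h9, h10, h11, h12, h13]

-- A's accumulate-append loop over the split lines is the map of pvEscapeLine
lemma pvFoldLines (ls : List String) (acc : List String) :
    ls.foldl (fun acc line =>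
      let stripped := PySem.Str.lstrip line
      let prefix_ws := PySem.Str.slice line none (some (PySem.Str.len line - PySem.Str.len stripped))
      if PySem.Str.startswith stripped "- " then
        acc ++ [prefix_ws ++ "- " ++ pvEscapeMarkdownA (PySem.Str.slice stripped (some 2) none)]
      else
        acc ++ [prefix_ws ++ pvEscapeMarkdownA stripped]) acc
    = acc ++ ls.map pvEscapeLine := by
  induction ls generalizing acc with
  | nil => simp
  | cons x xs ih =>
    simp only [List.foldl_cons, List.map_cons]
    rw [ih]
    simp only [pvEscapeLine, pvEscAB]
    split <;> simp

-- ===== VERDICT (by name: the statement is the Claim_ definition above) =====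
theorem escape_md_preserving_bullets_py_spec : Claim_equal_escape_md_preserving_bullets_py := by
  intro block _
  unfold Spec_escape_md_preserving_bullets_py escape_md_preserving_bullets_py escape_md_preserving_bullets_py_alt
  rw [pvFoldLines]
  simp
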